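-- pv_equiv track=rewrite | github.com/VillalbaEnzo/my_git | matrix_op.py | get_ascii_matrix
-- ===== SOURCE A (Python) =====
-- import sys, math
--
-- def get_ascii_matrix(string, size=-1):
--     result = []
--     idx = 0
--     length = len(string)
--
--     if size == -1:
--         size = math.ceil(math.sqrt(length))
--         nb_lines = size
--     else:
--         nb_lines = math.ceil(length / size)
--
--     for _ in range(nb_lines):
--         line = []
--         for _ in range(size):
--             if idx < length:
--                 line.append(ord(string[idx]))
--                 idx += 1
--             else:
--                 line.append(0)
--         result.append(line)
--     return result
-- ===== SOURCE B (Python) =====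
-- import math
--
-- def get_ascii_matrix(string, size=-1):
--     codes = [ord(c) for c in string]
--     length = len(codes)
--     if size == -1:
--         size = math.ceil(math.sqrt(length))
--         nb_lines = size
--     else:
--         nb_lines = math.ceil(length / size)
--     padded = codes + [0] * (nb_lines * size - length)
--     return [padded[i * size:(i + 1) * size] for i in range(nb_lines)]
-- ===== Notes on version B (the rewrite author's own statement) =====
-- stated objective: simpler
-- what changed: Replaces A's running-index, per-cell padding-branch nested loops with a build-then-chunk decomposition: compute the flat code list, pad it once to nb_lines*size with zeros, and slice it into rows.
-- outside the precondition, e.g. on get_ascii_matrix('ab', 0): A raises ZeroDivisionError, B raises ZeroDivisionError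
import Mathlib
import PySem

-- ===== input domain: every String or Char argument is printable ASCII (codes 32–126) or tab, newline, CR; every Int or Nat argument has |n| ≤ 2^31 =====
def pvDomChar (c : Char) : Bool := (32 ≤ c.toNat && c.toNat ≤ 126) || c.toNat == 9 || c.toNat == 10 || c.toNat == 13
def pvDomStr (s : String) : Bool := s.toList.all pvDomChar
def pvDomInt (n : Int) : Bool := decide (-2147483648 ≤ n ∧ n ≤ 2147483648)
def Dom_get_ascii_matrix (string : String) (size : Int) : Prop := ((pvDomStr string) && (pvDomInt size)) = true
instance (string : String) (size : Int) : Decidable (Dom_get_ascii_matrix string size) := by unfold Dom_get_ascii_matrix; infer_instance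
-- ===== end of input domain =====

-- B replaces A's running-index nested loops (per-cell padding branch) with a build-then-chunk
-- decomposition: flat code list, padded once, sliced into rows (objective: simpler).

-- ===== PORT A =====
-- math.ceil(math.sqrt n): exact for the string lengths admitted here (float sqrt is correctly rounded)
def pvCeilSqrt (n : Nat) : Nat :=
  let r := Nat.sqrt n
  if r * r = n then r else r + 1

-- math.ceil(a / b): the exact ceiling; matches Python's float-based math.ceil(a/b) on Dom's magnitudes
def pvCeilDiv (a b : Int) : Int := -(PySem.Int.floordiv (-a) b)

-- A's inner `for _ in range(size)` loop: state (line, idx)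
def pvInnerA (fuel : Nat) (cs : List Char) (line : List Int) (idx : Nat) : List Int × Nat :=
  match fuel with
  | 0 => (line, idx)
  | f + 1 =>
    if idx < cs.length then
      pvInnerA f cs (line ++ [((cs.getD idx ' ').toNat : Int)]) (idx + 1)
    else
      pvInnerA f cs (line ++ [0]) idx

-- A's outer `for _ in range(nb_lines)` loop: state (result, idx)
def pvOuterA (fuel : Nat) (k : Nat) (cs : List Char) (result : List (List Int)) (idx : Nat) :
    List (List Int) :=
  match fuel with
  | 0 => result
  | f + 1 =>
    let p := pvInnerA k cs [] idx
    pvOuterA f k cs (result ++ [p.1]) p.2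

def get_ascii_matrix (string : String) (size : Int) : List (List Int) :=
  let cs := string.toList
  let length : Int := cs.length
  let sn : Int × Int :=
    if size = -1 then ((pvCeilSqrt cs.length : Int), (pvCeilSqrt cs.length : Int))
    else (size, pvCeilDiv length size)
  pvOuterA sn.2.toNat sn.1.toNat cs [] 0

-- ===== PORT B =====
def get_ascii_matrix_alt (string : String) (size : Int) : List (List Int) :=
  let codes : List Int := string.toList.map (fun c => (c.toNat : Int))
  let length : Int := codes.length
  let sn : Int × Int :=
    if size = -1 then ((pvCeilSqrt string.toList.length : Int), (pvCeilSqrt string.toList.length : Int))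
    else (size, pvCeilDiv length size)
  let padded := codes ++ List.replicate (sn.2 * sn.1 - length).toNat (0 : Int)
  (List.range sn.2.toNat).map (fun (i : Nat) =>
    PySem.List.slice padded (some ((i : Int) * sn.1)) (some (((i : Int) + 1) * sn.1)))

-- ===== PRECONDITION & SPEC =====
-- Pre_ excludes only size = 0, on which A raises ZeroDivisionError (length / size).
def Pre_get_ascii_matrix (string : String) (size : Int) : Prop := size ≠ 0
instance (string : String) (size : Int) : Decidable (Pre_get_ascii_matrix string size) := by
  unfold Pre_get_ascii_matrix; infer_instance

def pvWitness_get_ascii_matrix : String × Int := ("ab", 2)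

def Spec_get_ascii_matrix (string : String) (size : Int) (out : List (List Int)) : Prop := out = get_ascii_matrix_alt string size
instance (string : String) (size : Int) (out : List (List Int)) : Decidable (Spec_get_ascii_matrix string size out) := by unfold Spec_get_ascii_matrix; infer_instance

-- ===== CLAIM (what is proved, stated in full; the proofs are below) =====
def Claim_equal_get_ascii_matrix : Prop := ∀ (string : String) (size : Int), Dom_get_ascii_matrix string size → Pre_get_ascii_matrix string size → Spec_get_ascii_matrix string size (get_ascii_matrix string size)

-- ===== LEMMAS AND PROOFS =====

-- the j-th row both programs produce: k entries starting at flat position j*k, zero-padded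
def pvRow (cs : List Char) (k j : Nat) : List Int :=
  (List.range k).map (fun t =>
    if j * k + t < cs.length then ((cs.getD (j * k + t) ' ').toNat : Int) else 0)

lemma pvInnerA_eq (cs : List Char) :
    ∀ (k idx : Nat) (line : List Int), idx ≤ cs.length →
      pvInnerA k cs line idx =
        (line ++ (List.range k).map (fun t =>
            if idx + t < cs.length then ((cs.getD (idx + t) ' ').toNat : Int) else 0),
         min (idx + k) cs.length) := by
  intro k
  induction k with
  | zero =>
    intro idx line h
    simp [pvInnerA]
    omega
  | succ k ih =>
    intro idx line h
    by_cases hlt : idx < cs.length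
    · rw [pvInnerA, if_pos hlt, ih (idx + 1) _ (by omega)]
      refine Prod.ext ?_ (by simp; omega)
      simp only [List.range_succ_eq_map, List.map_cons, List.map_map, List.append_assoc]
      simp only [Nat.add_zero, if_pos hlt]
      rw [List.singleton_append]
      have hm : List.map ((fun t => if idx + t < cs.length then ((cs.getD (idx + t) ' ').toNat : Int) else 0) ∘ Nat.succ) (List.range k) =
          List.map (fun t => if idx + 1 + t < cs.length then ((cs.getD (idx + 1 + t) ' ').toNat : Int) else 0) (List.range k) := by
        apply List.map_congr_left
        intro t _
        simp only [Function.comp_apply, Nat.succ_eq_add_one]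
        have ht : idx + (t + 1) = idx + 1 + t := by omega
        rw [ht]
      rw [hm]
    · have hz : ∀ m, (List.range m).map (fun t =>
          if idx + t < cs.length then ((cs.getD (idx + t) ' ').toNat : Int) else 0) =
          List.replicate m (0 : Int) := by
        intro m
        rw [List.eq_replicate_iff]
        refine ⟨by simp, ?_⟩
        intro b hb
        simp only [List.mem_map, List.mem_range] at hb
        obtain ⟨t, _, rfl⟩ := hb
        rw [if_neg (by omega)]
      rw [pvInnerA, if_neg hlt, ih idx _ h]
      rw [hz, hz]
      refine Prod.ext ?_ (by simp; omega)
      simp [List.replicate_succ]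

lemma pvOuterA_eq (cs : List Char) (k : Nat) :
    ∀ (n i : Nat) (result : List (List Int)),
      pvOuterA n k cs result (min (i * k) cs.length) =
        result ++ (List.range' i n).map (pvRow cs k) := by
  intro n
  induction n with
  | zero => intro i result; simp [pvOuterA]
  | succ n ih =>
    intro i result
    rw [pvOuterA, pvInnerA_eq cs k (min (i * k) cs.length) [] (by omega)]
    have hrow : (List.range k).map (fun t =>
        if min (i * k) cs.length + t < cs.length then
          ((cs.getD (min (i * k) cs.length + t) ' ').toNat : Int) else 0) = pvRow cs k i := by
      unfold pvRow
      rcases Nat.le_total (i * k) cs.length with hle | hle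
      · rw [Nat.min_eq_left hle]
      · apply List.map_congr_left
        intro t _
        rw [if_neg (by omega), if_neg (by omega)]
    have hidx : min (min (i * k) cs.length + k) cs.length = min ((i + 1) * k) cs.length := by
      have : (i + 1) * k = i * k + k := by ring
      omega
    simp only [List.nil_append, hrow, hidx]
    rw [ih (i + 1) (result ++ [pvRow cs k i])]
    simp [List.range'_succ]

lemma portA_rows (cs : List Char) (k n : Nat) :
    pvOuterA n k cs [] 0 = (List.range n).map (pvRow cs k) := by
  have h := pvOuterA_eq cs k n 0 []
  simpa [List.range_eq_range'] using h

lemma portB_row (cs : List Char) (k n i : Nat) (hlen : cs.length ≤ n * k) (hi : i < n) :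
    ((cs.map (fun c => (c.toNat : Int)) ++ List.replicate (n * k - cs.length) (0 : Int)).drop
        (i * k)).take ((i + 1) * k - i * k) = pvRow cs k i := by
  have hik : (i + 1) * k = i * k + k := by ring
  have hpadlen : (cs.map (fun c => (c.toNat : Int)) ++
      List.replicate (n * k - cs.length) (0 : Int)).length = n * k := by
    simp; omega
  have hnk : (i + 1) * k ≤ n * k := Nat.mul_le_mul_right k hi
  apply List.ext_getElem
  · simp [pvRow, hpadlen]; omega
  · intro j h1 h2
    have hj : j < k := by
      simp [hpadlen] at h1
      omega
    have hjlt : i * k + j < n * k := by omega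
    simp only [List.getElem_take, List.getElem_drop]
    simp only [pvRow, List.getElem_map, List.getElem_range]
    by_cases hc : i * k + j < cs.length
    · rw [List.getElem_append_left (by simpa using hc), if_pos hc]
      rw [List.getElem_map, List.getD_eq_getElem cs ' ' hc]
    · rw [List.getElem_append_right (by simpa using hc), if_neg hc]
      simp

lemma portB_rows (cs : List Char) (k n : Nat) (hlen : cs.length ≤ n * k) :
    (List.range n).map (fun (i : Nat) =>
        PySem.List.slice (cs.map (fun c => (c.toNat : Int)) ++
            List.replicate (n * k - cs.length) (0 : Int))
          (some ((i : Int) * (k : Int))) (some (((i : Int) + 1) * (k : Int)))) =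
      (List.range n).map (pvRow cs k) := by
  apply List.map_congr_left
  intro i hi
  rw [List.mem_range] at hi
  have c1 : ((i : Int) * (k : Int)) = ((i * k : Nat) : Int) := by push_cast; ring
  have c2 : (((i : Int) + 1) * (k : Int)) = (((i + 1) * k : Nat) : Int) := by push_cast; ring
  rw [c1, c2, PySem.List.slice_natCast]
  exact portB_row cs k n i hlen hi

-- the common core: for any k n with enough room, both extractions give the same rows
lemma ports_agree (cs : List Char) (k n : Nat) (hlen : cs.length ≤ n * k) :
    pvOuterA n k cs [] 0 =
      (List.range n).map (fun (i : Nat) =>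
        PySem.List.slice (cs.map (fun c => (c.toNat : Int)) ++
            List.replicate (n * k - cs.length) (0 : Int))
          (some ((i : Int) * (k : Int))) (some (((i : Int) + 1) * (k : Int)))) := by
  rw [portA_rows, portB_rows cs k n hlen]

lemma ceilSqrt_sq (m : Nat) : m ≤ pvCeilSqrt m * pvCeilSqrt m := by
  unfold pvCeilSqrt
  by_cases h : Nat.sqrt m * Nat.sqrt m = m
  · simp [h]
  · rw [if_neg h]
    have := Nat.lt_succ_sqrt m
    simp only [Nat.succ_eq_add_one] at this
    omega

lemma ceilDiv_pos_bound (a b : Int) (ha : 0 ≤ a) (hb : 0 < b) :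
    0 ≤ pvCeilDiv a b ∧ a ≤ pvCeilDiv a b * b := by
  have h := (PySem.Int.neg_floordiv_neg_eq_iff_of_pos (a := a) (b := b)
      (q := pvCeilDiv a b) hb).mp rfl
  refine ⟨?_, h.2⟩
  by_contra hneg
  have hq : pvCeilDiv a b ≤ -1 := by omega
  have h2 : pvCeilDiv a b * b ≤ (-1) * b := mul_le_mul_of_nonneg_right hq (le_of_lt hb)
  omega

lemma ceilDiv_neg_nonpos (a b : Int) (ha : 0 ≤ a) (hb : b < 0) : pvCeilDiv a b ≤ 0 := by
  unfold pvCeilDiv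
  have h1 : PySem.Int.floordiv (-a) b = PySem.Int.floordiv a (-b) := by
    have := PySem.Int.floordiv_neg_neg a (-b)
    simpa using this
  rw [h1, PySem.Int.floordiv_eq_ediv_of_pos (by omega)]
  have : 0 ≤ a / (-b) := Int.ediv_nonneg ha (by omega)
  exact neg_nonpos.mpr this

-- ===== VERDICT (by name: the statement is the Claim_ definition above) =====
theorem get_ascii_matrix_spec : Claim_equal_get_ascii_matrix := by
  intro string size _ hpre
  unfold Spec_get_ascii_matrix
  unfold get_ascii_matrix get_ascii_matrix_alt
  set cs := string.toList with hcs
  simp only [List.length_map]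
  by_cases hm1 : size = -1
  · simp only [if_pos hm1]
    set k := pvCeilSqrt cs.length with hk
    have hlen : cs.length ≤ k * k := ceilSqrt_sq cs.length
    have h2 : ((k : Int) * (k : Int) - (cs.length : Int)).toNat = k * k - cs.length := by
      omega
    simp only [Int.toNat_natCast, h2]
    exact ports_agree cs k k hlen
  · simp only [if_neg hm1]
    rcases lt_or_gt_of_ne (hpre : size ≠ 0) with hneg | hpos
    · -- size < 0: nb_lines ≤ 0, both results are empty
      have hn : pvCeilDiv (cs.length : Int) size ≤ 0 :=
        ceilDiv_neg_nonpos _ _ (by positivity) hneg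
      have h0 : (pvCeilDiv (cs.length : Int) size).toNat = 0 := by omega
      simp [h0, pvOuterA]
    · -- size > 0
      set n' := pvCeilDiv (cs.length : Int) size with hn'
      obtain ⟨hn0, hbound⟩ := ceilDiv_pos_bound (cs.length : Int) size (by positivity) hpos
      set k := size.toNat with hkdef
      set n := n'.toNat with hndef
      have hsize : size = (k : Int) := by omega
      have hne : n' = (n : Int) := by omega
      have hlen : cs.length ≤ n * k := by
        have : (cs.length : Int) ≤ (n : Int) * (k : Int) := by
          rw [← hne, ← hsize]; exact hbound
        exact_mod_cast this
      have h2 : (n' * size - (cs.length : Int)).toNat = n * k - cs.length := by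
        rw [hne, hsize]
        omega
      rw [h2]
      simp only [hsize]
      exact ports_agree cs k n hlen
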